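-- pv_equiv track=rewrite | github.com/zeiger2/Cem2_Lab2_AuCD | AuCD_Cem2_Lab2/AuCD_Cem2_Lab2.py | variable_encoding
-- ===== SOURCE A (Python) =====
-- def variable_encoding(x):
--     x_int = int(round(x))
--     if x_int == 0:
--         return (0, '')
--
--     l = 0
--     while abs(x_int) >= (1 << l):
--         l += 1
--
--     if x_int > 0:
--         bits = bin(x_int)[2:].zfill(l)
--     else:
--         bits = bin(x_int + (1 << l) - 1)[2:].zfill(l)
--
--     return (l, bits[-l:] if l > 0 else '')
-- ===== SOURCE B (Python) =====
-- def variable_encoding(x):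
--     n = int(round(x))
--     if n == 0:
--         return (0, '')
--     # Extract the binary digits of abs(n) least-significant-first by repeated halving;
--     # for negative n, A's value n + 2**l - 1 equals 2**l - 1 - abs(n), i.e. the bitwise
--     # complement of abs(n) within l bits, so we emit flipped characters instead of
--     # computing an arithmetic offset and padding.
--     m = abs(n)
--     digits = []
--     while m:
--         digits.append(m & 1)
--         m >>= 1
--     if n > 0:
--         bits = ''.join('1' if d else '0' for d in reversed(digits))
--     else:
--         bits = ''.join('0' if d else '1' for d in reversed(digits))
--     return (len(digits), bits)
-- ===== Notes on version B (the rewrite author's own statement) =====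
-- stated objective: alternative
-- what changed: B extracts the binary digits of abs(x) least-significant-first by repeated halving and, for negative inputs, emits each digit flipped (the one's-complement identity n + 2**l - 1 == 2**l - 1 - abs(n)), replacing A's bit-width search loop, the arithmetic offset, bin()/zfill padding and the trailing slice.
import Mathlib
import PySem

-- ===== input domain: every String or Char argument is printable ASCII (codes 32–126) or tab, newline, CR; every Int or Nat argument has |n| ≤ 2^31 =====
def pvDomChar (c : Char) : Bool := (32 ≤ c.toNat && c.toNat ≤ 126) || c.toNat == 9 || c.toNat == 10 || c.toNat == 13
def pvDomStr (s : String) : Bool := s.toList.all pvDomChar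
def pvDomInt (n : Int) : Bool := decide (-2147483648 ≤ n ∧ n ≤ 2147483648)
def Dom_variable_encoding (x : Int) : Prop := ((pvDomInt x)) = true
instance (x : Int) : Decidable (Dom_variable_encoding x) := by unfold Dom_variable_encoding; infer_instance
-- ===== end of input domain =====

-- B replaces A's bit-width search loop, arithmetic offset, bin()/zfill padding and trailing
-- slice by LSB-first digit extraction via repeated halving, with per-digit complement for
-- negative inputs (objective: alternative).

-- ===== PORT A =====

-- 'l = 0; while abs(x_int) >= (1 << l): l += 1'  (abs(x_int) is x.natAbs, 1 << l is 2 ^ l; exact)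
def pvFindL (a : Nat) (l : Nat) : Nat :=
  if 2 ^ l ≤ a then pvFindL a (l + 1) else l
  termination_by a + 1 - 2 ^ l
  decreasing_by
    rename_i h
    exact Nat.sub_lt_sub_left (by omega) (Nat.pow_lt_pow_right (by omega) (by omega))

-- binary digits of v, msb first, empty for 0 (the digit recursion behind bin(v) for v ≥ 0)
def pvBinDigits (v : Nat) : List Char :=
  if v = 0 then [] else pvBinDigits (v / 2) ++ [if v % 2 = 1 then '1' else '0']
  termination_by v
  decreasing_by omega

-- bin(v)[2:] for v ≥ 0 (bin(0)[2:] = "0"); exact on the nonnegative arguments A uses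
def pvBin (v : Nat) : List Char := if v = 0 then ['0'] else pvBinDigits v

-- s.zfill(l); exact here since A's strings never carry a sign character
def pvZfill (s : List Char) (l : Nat) : List Char := List.replicate (l - s.length) '0' ++ s

def variable_encoding (x : Int) : Int × String :=
  -- x_int = int(round(x)) = x for an int argument
  if x = 0 then ((0 : Int), "")
  else
    let l := pvFindL x.natAbs 0
    let bits := if x > 0 then pvZfill (pvBin x.toNat) l
                else pvZfill (pvBin (x + 2 ^ l - 1).toNat) l
    ((l : Int), if l > 0 then String.ofList (PySem.List.slice bits (some (-(l : Int))) none) else "")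

-- ===== PORT B =====

-- 'while m: digits.append(m & 1); m >>= 1'  — digits of m, least significant first
def pvDigits (m : Nat) : List Bool :=
  if m = 0 then [] else decide (m % 2 = 1) :: pvDigits (m / 2)
  termination_by m
  decreasing_by omega

def variable_encoding_alt (x : Int) : Int × String :=
  if x = 0 then ((0 : Int), "")
  else
    let ds := pvDigits x.natAbs
    let bits := if x > 0 then ds.reverse.map (fun d => if d then '1' else '0')
                else ds.reverse.map (fun d => if d then '0' else '1')
    ((ds.length : Int), String.ofList bits)

-- ===== PRECONDITION & SPEC =====
def Spec_variable_encoding (x : Int) (out : Int × String) : Prop := out = variable_encoding_alt x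
instance (x : Int) (out : Int × String) : Decidable (Spec_variable_encoding x out) := by unfold Spec_variable_encoding; infer_instance

-- ===== CLAIM (what is proved, stated in full; the proofs are below) =====
def Claim_equal_variable_encoding : Prop := ∀ (x : Int), Dom_variable_encoding x → Spec_variable_encoding x (variable_encoding x)

-- ===== LEMMAS AND PROOFS =====

-- bit length, the common yardstick of both programs (proof-side only)
def pvBitLength (n : Nat) : Nat := if n = 0 then 0 else Nat.log2 n + 1

-- fixed-width msb-first bit string, the common normal form of both programs (proof-side only)
def pvFmtBits (l : Nat) (v : Nat) : List Char :=
  (List.range l).reverse.map (fun i => if v.testBit i then '1' else '0')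

-- A's while loop computes max l (pvBitLength a)
theorem pvFindL_eq (a l : Nat) : pvFindL a l = max l (pvBitLength a) := by
  induction l using pvFindL.induct a with
  | case1 l h ih =>
    rw [pvFindL, if_pos h, ih]
    have ha : a ≠ 0 := by
      have := Nat.two_pow_pos l
      omega
    have hl : l ≤ Nat.log2 a := (Nat.le_log2 ha).mpr h
    simp [pvBitLength, ha]
    omega
  | case2 l h =>
    rw [pvFindL, if_neg h]
    by_cases ha : a = 0
    · simp [pvBitLength, ha]
    · have := (Nat.log2_lt ha).mpr (by omega : a < 2 ^ l)
      simp [pvBitLength, ha]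
      omega

theorem pvFmtBits_length (l v : Nat) : (pvFmtBits l v).length = l := by
  simp [pvFmtBits]

-- peel the most significant position
theorem pvFmtBits_msb (l v : Nat) :
    pvFmtBits (l + 1) v = (if v.testBit l then '1' else '0') :: pvFmtBits l v := by
  simp [pvFmtBits, List.range_succ]

-- peel the least significant position
theorem pvFmtBits_lsb (l v : Nat) :
    pvFmtBits (l + 1) v = pvFmtBits l (v / 2) ++ [if v % 2 = 1 then '1' else '0'] := by
  simp only [pvFmtBits, List.range_succ_eq_map, List.reverse_cons, List.map_append,
    List.map_map, List.map_reverse, List.map_cons, List.map_nil]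
  congr 1
  · congr 1
    refine List.map_congr_left ?_
    intro i _
    simp only [Function.comp_apply, ← Nat.testBit_succ]
  · simp [Nat.testBit_zero]

theorem pvBitLength_step (v : Nat) (hv : 1 ≤ v) :
    pvBitLength v = pvBitLength (v / 2) + 1 := by
  by_cases h2 : 2 ≤ v
  · have hd : v / 2 ≠ 0 := by omega
    have hlog : Nat.log2 v = Nat.log2 (v / 2) + 1 := by
      rw [Nat.log2_eq_log_two, Nat.log2_eq_log_two, Nat.log_div_base]
      have := Nat.log_pos (by omega : 1 < 2) (by omega : 2 ≤ v)
      omega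
    rw [pvBitLength, pvBitLength, if_neg (by omega : ¬ v = 0), if_neg hd, hlog]
  · have hv1 : v = 1 := by omega
    subst hv1
    decide

theorem pvBinDigits_eq (v : Nat) (hv : 1 ≤ v) :
    pvBinDigits v = pvFmtBits (pvBitLength v) v := by
  induction v using Nat.strong_induction_on with
  | _ v ih =>
    rw [pvBinDigits, if_neg (by omega)]
    rw [pvBitLength_step v hv, pvFmtBits_lsb]
    congr 1
    by_cases hd : v / 2 = 0
    · rw [hd]
      simp [pvBinDigits, pvBitLength, pvFmtBits]
    · exact ih (v / 2) (by omega) (by omega)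

theorem pvBitLength_le (v l : Nat) (h : v < 2 ^ l) : pvBitLength v ≤ l := by
  by_cases hv : v = 0
  · simp [pvBitLength, hv]
  · have := (Nat.log2_lt hv).mpr h
    simp [pvBitLength, hv]; omega

theorem pvBitLength_lt (v : Nat) : v < 2 ^ pvBitLength v := by
  by_cases hv : v = 0
  · simp [pvBitLength, hv]
  · simpa [pvBitLength, hv] using Nat.lt_log2_self (n := v)

-- zero-padding to width l is invisible to fixed-width formatting
theorem pvFmtBits_pad (l v : Nat) (h : v < 2 ^ l) :
    pvFmtBits l v = List.replicate (l - pvBitLength v) '0' ++ pvFmtBits (pvBitLength v) v := by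
  induction l with
  | zero =>
    have : v = 0 := by simpa using h
    simp [this, pvBitLength, pvFmtBits]
  | succ k ih =>
    by_cases hm : pvBitLength v = k + 1
    · simp [hm]
    · have hle : pvBitLength v ≤ k + 1 := pvBitLength_le v (k + 1) h
      have hvk : v < 2 ^ k := by
        have := pvBitLength_lt v
        calc v < 2 ^ pvBitLength v := this
          _ ≤ 2 ^ k := Nat.pow_le_pow_right (by omega) (by omega)
      rw [pvFmtBits_msb, Nat.testBit_lt_two_pow hvk, ih hvk]
      have : k + 1 - pvBitLength v = (k - pvBitLength v) + 1 := by omega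
      rw [this, List.replicate_succ]
      simp

-- A's padded bin string equals the fixed-width normal form, for v < 2^l
theorem pvZfill_pvBin (l v : Nat) (hl : 1 ≤ l) (h : v < 2 ^ l) :
    pvZfill (pvBin v) l = pvFmtBits l v := by
  by_cases hv : v = 0
  · subst hv
    have h0 : pvFmtBits l 0 = List.replicate l '0' := by
      rw [pvFmtBits_pad l 0 h]
      simp [pvBitLength, pvFmtBits]
    rw [h0]
    simp [pvBin, pvZfill]
    rw [(by omega : l = (l - 1) + 1), List.replicate_succ']
    simp
  · rw [pvBin, if_neg hv, pvBinDigits_eq v (by omega), pvFmtBits_pad l v h]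
    simp [pvZfill, pvFmtBits_length]

-- the final bits[-l:] on the length-l string is the identity
theorem slice_last_self (s : List Char) (l : Nat) (hl : 0 < l) (hs : s.length = l) :
    PySem.List.slice s (some (-(l : Int))) none = s := by
  rw [PySem.List.slice_from_neg_natCast s l hl, hs]
  simp

-- B's digit count is the bit length
theorem pvDigits_length (m : Nat) : (pvDigits m).length = pvBitLength m := by
  induction m using Nat.strong_induction_on with
  | _ m ih =>
    by_cases hm : m = 0
    · simp [pvDigits, pvBitLength, hm]
    · rw [pvDigits, if_neg hm, List.length_cons, ih (m / 2) (by omega),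
        pvBitLength_step m (by omega)]

-- B's reversed digit string under any rendering f, as a range map
theorem pvDigits_reverse_map (f : Bool → Char) (m : Nat) :
    (pvDigits m).reverse.map f
      = (List.range (pvBitLength m)).reverse.map (fun i => f (m.testBit i)) := by
  induction m using Nat.strong_induction_on with
  | _ m ih =>
    by_cases hm : m = 0
    · simp [pvDigits, pvBitLength, hm]
    · rw [pvDigits, if_neg hm, pvBitLength_step m (by omega), List.reverse_cons,
        List.map_append, ih (m / 2) (by omega), List.range_succ_eq_map]
      simp only [List.reverse_cons, List.map_append, List.map_reverse, List.map_map,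
        List.map_cons, List.map_nil]
      congr 1
      · congr 1
        refine List.map_congr_left ?_
        intro i _
        simp only [Function.comp_apply, ← Nat.testBit_succ]
      · rcases Nat.mod_two_eq_zero_or_one m with h | h <;> simp [Nat.testBit_zero, h]

-- complement within l bits: bit i of 2^l - 1 - n is the flip of bit i of n, for i < l
theorem pvFmtBits_compl (l : Nat) : ∀ n, n < 2 ^ l →
    pvFmtBits l (2 ^ l - 1 - n)
      = (List.range l).reverse.map (fun i => if n.testBit i then '0' else '1') := by
  induction l with
  | zero => intro n h; simp [pvFmtBits]
  | succ k ih =>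
    intro n h
    have hp : 0 < 2 ^ k := Nat.two_pow_pos k
    have h2 : 2 ^ (k + 1) = 2 * 2 ^ k := by rw [Nat.pow_succ]; ring
    have hdiv : (2 ^ (k + 1) - 1 - n) / 2 = 2 ^ k - 1 - n / 2 := by omega
    have hmod : (2 ^ (k + 1) - 1 - n) % 2 = 1 - n % 2 := by omega
    rw [pvFmtBits_lsb, hdiv, hmod, ih (n / 2) (by omega), List.range_succ_eq_map]
    simp only [List.reverse_cons, List.map_append, List.map_reverse, List.map_map,
      List.map_cons, List.map_nil]
    congr 1
    · congr 1
      refine List.map_congr_left ?_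
      intro i _
      simp only [Function.comp_apply, ← Nat.testBit_succ]
    · rcases Nat.mod_two_eq_zero_or_one n with hn | hn <;> simp [Nat.testBit_zero, hn]

-- ===== VERDICT (by name: the statement is the Claim_ definition above) =====
theorem variable_encoding_spec : Claim_equal_variable_encoding := by
  intro x _
  unfold Spec_variable_encoding variable_encoding variable_encoding_alt
  by_cases hx : x = 0
  · simp [hx]
  · simp only [if_neg hx]
    rw [pvFindL_eq, Nat.zero_max]
    set n := x.natAbs with hn
    set L := pvBitLength n with hL
    have hn1 : 1 ≤ n := by omega
    have hL1 : 1 ≤ L := by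
      rw [hL, pvBitLength, if_neg (by omega : ¬ n = 0)]
      omega
    have hnL : n < 2 ^ L := pvBitLength_lt n
    have hpow : ((2 : Int) ^ L) = ((2 ^ L : Nat) : Int) := by push_cast; ring
    have hlen := pvDigits_length n
    by_cases hpos : x > 0
    · have hv : x.toNat = n := by omega
      simp only [if_pos hpos]
      rw [if_pos (by omega : L > 0), hv, pvZfill_pvBin L n hL1 hnL,
        slice_last_self _ L (by omega) (pvFmtBits_length L n),
        pvDigits_reverse_map _ n, hlen]
      rfl
    · have hv : (x + 2 ^ L - 1).toNat = 2 ^ L - 1 - n := by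
        rw [hpow]; omega
      have hvlt : 2 ^ L - 1 - n < 2 ^ L := by
        have := Nat.two_pow_pos L
        omega
      simp only [if_neg hpos]
      rw [if_pos (by omega : L > 0), hv, pvZfill_pvBin L (2 ^ L - 1 - n) hL1 hvlt,
        slice_last_self _ L (by omega) (pvFmtBits_length L _),
        pvFmtBits_compl L n hnL, pvDigits_reverse_map _ n, hlen]
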